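-- pv_equiv track=rewrite | github.com/mdproctor/mdproctor.github.io | scripts/generate_index.py | group_by_author
-- ===== SOURCE A (Python) =====
-- def group_by_author(posts: list[dict]) -> dict[str, list[dict]]:
--     """Group posts by author_slug, each group sorted by date descending."""
--     grouped: dict[str, list[dict]] = {}
--     for post in posts:
--         slug = post.get('author_slug', 'unknown')
--         grouped.setdefault(slug, []).append(post)
--     for slug in grouped:
--         grouped[slug].sort(key=lambda p: p.get('date', ''), reverse=True)
--     return dict(sorted(grouped.items()))
-- ===== SOURCE B (Python) =====
-- def group_by_author(posts: list[dict]) -> dict[str, list[dict]]: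
--     """Group posts by author_slug, each group sorted by date descending."""
--     slugs = sorted({p.get('author_slug', 'unknown') for p in posts})
--     return {
--         s: sorted((p for p in posts if p.get('author_slug', 'unknown') == s),
--                   key=lambda p: p.get('date', ''), reverse=True)
--         for s in slugs
--     }
-- ===== Notes on version B (the rewrite author's own statement) =====
-- stated objective: simpler
-- what changed: B drops the dict-of-lists accumulator, the setdefault loop and the in-place per-group sorts: it computes the sorted set of author slugs once and builds each group directly by a filter over posts followed by one sort per slug.
import Mathlib
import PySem

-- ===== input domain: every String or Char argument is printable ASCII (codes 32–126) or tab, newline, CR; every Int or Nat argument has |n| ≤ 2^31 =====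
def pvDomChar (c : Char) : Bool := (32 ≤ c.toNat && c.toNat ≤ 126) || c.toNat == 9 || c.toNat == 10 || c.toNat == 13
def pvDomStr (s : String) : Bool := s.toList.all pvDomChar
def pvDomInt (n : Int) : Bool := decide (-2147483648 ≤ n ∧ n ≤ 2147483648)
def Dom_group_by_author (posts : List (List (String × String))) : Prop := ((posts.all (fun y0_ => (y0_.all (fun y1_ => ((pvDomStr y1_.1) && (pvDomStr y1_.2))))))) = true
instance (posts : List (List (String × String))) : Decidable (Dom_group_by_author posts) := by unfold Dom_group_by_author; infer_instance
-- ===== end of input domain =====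

-- B replaces A's dict-of-lists accumulation and in-place per-group sorts by: sorted distinct slugs, then a filter + sort per slug (objective: simpler).

-- ===== PORT A =====
-- post.get(k, dflt): a post is an association list (first match wins, matching the dict convention)
def pvGet (post : List (String × String)) (k dflt : String) : String :=
  match post.find? (fun kv => kv.1 == k) with
  | some kv => kv.2
  | none => dflt

-- slug = post.get('author_slug', 'unknown');  p.get('date', '')
def pvSlug (p : List (String × String)) : String := pvGet p "author_slug" "unknown"
def pvDate (p : List (String × String)) : String := pvGet p "date" ""

-- grouped = {}; for post in posts: grouped.setdefault(slug, []).append(post)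
def pvGrouped (posts : List (List (String × String))) : PySem.Dict String (List (List (String × String))) :=
  posts.foldl (fun d p => d.modify (pvSlug p) [] (fun v => v ++ [p])) PySem.Dict.empty

def group_by_author (posts : List (List (String × String))) : List (String × List (List (String × String))) :=
  -- for slug in grouped: grouped[slug].sort(key=lambda p: p.get('date',''), reverse=True)
  -- then dict(sorted(grouped.items())): the keys are distinct, so the tuple comparison reads only the slug
  PySem.List.sorted
    ((pvGrouped posts).keys.foldl
      (fun d s => d.modify s [] (fun v => PySem.List.sorted v pvDate true))
      (pvGrouped posts)).items
    (fun kv => kv.1) false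

-- ===== PORT B =====
def group_by_author_alt (posts : List (List (String × String))) : List (String × List (List (String × String))) :=
  -- slugs = sorted({p.get('author_slug','unknown') for p in posts})
  -- {s: sorted((p for p in posts if p.get('author_slug','unknown') == s), key=..., reverse=True) for s in slugs}
  (PySem.List.sorted (PySem.Set.ofList (posts.map pvSlug)) (fun s => s) false).map
    (fun s => (s, PySem.List.sorted (posts.filter (fun p => pvSlug p == s)) pvDate true))

-- ===== PRECONDITION & SPEC =====
def Spec_group_by_author (posts : List (List (String × String))) (out : List (String × List (List (String × String)))) : Prop := out = group_by_author_alt posts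
instance (posts : List (List (String × String))) (out : List (String × List (List (String × String)))) : Decidable (Spec_group_by_author posts out) := by unfold Spec_group_by_author; infer_instance

-- ===== CLAIM (what is proved, stated in full; the proofs are below) =====
def Claim_equal_group_by_author : Prop := ∀ (posts : List (List (String × String))), Dom_group_by_author posts → Spec_group_by_author posts (group_by_author posts)

-- ===== LEMMAS AND PROOFS =====

-- A's grouping fold, characterized: getD s = the posts with slug s, in input order
lemma grouped_getD (posts : List (List (String × String))) (s : String) :
    (pvGrouped posts).getD s [] = posts.filter (fun p => pvSlug p == s) := by
  have h := PySem.Dict.getD_foldl_modify_append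
      (posts.map (fun p => (pvSlug p, p))) (PySem.Dict.empty) s
  rw [List.foldl_map] at h
  simpa [pvGrouped, List.filter_map, Function.comp_def, List.map_id'] using h

-- and its keys: the distinct slugs, in first-occurrence order
lemma grouped_keys (posts : List (List (String × String))) :
    (pvGrouped posts).keys = PySem.Set.ofList (posts.map pvSlug) := by
  have h := PySem.Dict.keys_foldl_modify_key posts pvSlug ([] : List (List (String × String)))
      (fun _ p => fun v => v ++ [p]) PySem.Dict.empty
  simpa [pvGrouped, PySem.Set.update_nil_left] using h

-- a fold modifying each of a Nodup list of keys once: pointwise effect on getD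
lemma modifyAll_getD {ν : Type} (g : ν → ν) (d0 : ν) :
    ∀ (ks : List String) (d : PySem.Dict String ν), ks.Nodup → ∀ t,
      (ks.foldl (fun d s => d.modify s d0 g) d).getD t d0
        = if t ∈ ks then g (d.getD t d0) else d.getD t d0 := by
  intro ks
  induction ks with
  | nil => intro d _ t; simp
  | cons s ks ih =>
    intro d hnd t
    have hs : s ∉ ks := (List.nodup_cons.mp hnd).1
    simp only [List.foldl_cons]
    rw [ih (d.modify s d0 g) hnd.of_cons t]
    by_cases hts : t = s
    · subst hts
      simp [hs, PySem.Dict.getD_modify_self]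
    · by_cases htk : t ∈ ks
      · simp [htk, hts, PySem.Dict.getD_modify_of_ne _ _ _ hts]
      · simp [htk, hts, PySem.Dict.getD_modify_of_ne _ _ _ hts]

-- the same fold keeps the key list unchanged when every modified key is present
lemma modifyAll_keys {ν : Type} (g : ν → ν) (d0 : ν) :
    ∀ (ks : List String) (d : PySem.Dict String ν), (∀ s ∈ ks, d.contains s = true) →
      (ks.foldl (fun d s => d.modify s d0 g) d).keys = d.keys := by
  intro ks
  induction ks with
  | nil => intro d _; rfl
  | cons s ks ih =>
    intro d hc
    simp only [List.foldl_cons]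
    have hcs : d.contains s = true := hc s (by simp)
    have hk : (d.modify s d0 g).keys = d.keys := by
      rw [PySem.Dict.keys_modify, PySem.Dict.keys_insert_of_contains _ _ hcs]
    rw [ih (d.modify s d0 g) (fun t ht => by
      rw [PySem.Dict.contains_modify]
      simp [hc t (by simp [ht])]), hk]

theorem pv_main : ∀ (posts : List (List (String × String))),
    group_by_author posts = group_by_author_alt posts := by
  intro posts
  unfold group_by_author group_by_author_alt
  set g := fun v => PySem.List.sorted v pvDate true with hgfun
  set grouped := pvGrouped posts with hgdef
  have hkeys : grouped.keys = PySem.Set.ofList (posts.map pvSlug) := grouped_keys posts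
  have hnd : grouped.keys.Nodup := by
    rw [hkeys]; exact PySem.Set.nodup_ofList _
  set grouped2 := grouped.keys.foldl (fun d s => d.modify s [] g) grouped with hg2
  have hkeys2 : grouped2.keys = grouped.keys :=
    modifyAll_keys g [] grouped.keys grouped
      (fun s hs => (PySem.Dict.contains_iff_mem_keys grouped s).mpr hs)
  have hnd2 : grouped2.keys.Nodup := by rw [hkeys2]; exact hnd
  have hitems : grouped2.items
      = (PySem.Set.ofList (posts.map pvSlug)).map (fun s =>
          (s, PySem.List.sorted (posts.filter (fun p => pvSlug p == s)) pvDate true)) := by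
    rw [PySem.Dict.items_eq_map_keys grouped2 hnd2 [], hkeys2, hkeys]
    apply List.map_congr_left
    intro s hs
    have hmem : s ∈ grouped.keys := by rw [hkeys]; exact hs
    rw [hg2, modifyAll_getD g [] grouped.keys grouped hnd s]
    simp only [hmem, if_pos, hgfun]
    rw [hgdef, grouped_getD posts s]
  rw [hitems]
  apply PySem.List.sorted_eq_of_perm_of_pairwise_lt
  · exact List.Perm.map _ (PySem.List.sorted_perm (PySem.Set.ofList (posts.map pvSlug)) (fun s => s) false)
  · rw [List.pairwise_map]
    exact PySem.List.sorted_ofList_pairwise_lt (posts.map pvSlug)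

-- ===== VERDICT (by name: the statement is the Claim_ definition above) =====
theorem group_by_author_spec : Claim_equal_group_by_author := fun posts _ => pv_main posts
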